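-- pv_equiv track=rewrite | github.com/vaishnavimukala/100-Days-Challenge | digit_order_check.py | check
-- ===== SOURCE A (Python) =====
-- def check(s):
--     ascen=descen=0
--     for i in range(0,len(s)-1):
--         if s[i]<s[i+1]:
--             ascen+=1
--         elif s[i]>s[i+1]:
--             descen+=1
--         else:
--             break
--     if ascen==len(s)-1:
--         return("is Ascending")
--     elif descen==len(s)-1:
--         return("is descending")
--     else:
--         return("Not in order")
-- ===== SOURCE B (Python) =====
-- def check(s):
--     pairs = list(zip(s, s[1:]))
--     if all(a < b for a, b in pairs):
--         return "is Ascending"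
--     if all(a > b for a, b in pairs):
--         return "is descending"
--     return "Not in order"
-- ===== Notes on version B (the rewrite author's own statement) =====
-- stated objective: idiomatic
-- what changed: Replaced the counting loop with break and the count==len-1 comparisons by two short-circuit all() predicate scans over adjacent pairs (zip(s, s[1:])).
-- intended difference: On the empty string A returns "Not in order" only because its counter 0 cannot equal the accidental len(s)-1 = -1, while B returns "is Ascending" (vacuously ordered), consistent with the single-character case both programs treat as ascending. — e.g. on check(""): A returns "Not in order", B returns "is Ascending"
import Mathlib
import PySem

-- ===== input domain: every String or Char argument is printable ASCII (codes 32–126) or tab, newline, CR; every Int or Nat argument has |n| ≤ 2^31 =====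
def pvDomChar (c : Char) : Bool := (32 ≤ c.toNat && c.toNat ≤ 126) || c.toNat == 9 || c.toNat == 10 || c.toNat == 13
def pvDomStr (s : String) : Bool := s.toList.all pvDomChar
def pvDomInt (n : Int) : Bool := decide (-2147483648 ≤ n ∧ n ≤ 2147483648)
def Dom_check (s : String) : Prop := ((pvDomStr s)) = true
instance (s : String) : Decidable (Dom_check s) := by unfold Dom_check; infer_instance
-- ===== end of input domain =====

-- B replaces A's counting loop (with break) by two short-circuit adjacent-pair predicate scans (idiomatic).

-- ===== PORT A =====
-- the for-loop over range(0, len(s)-1) with its break, carrying the (ascen, descen) counters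
def checkAux (cs : List Char) (i : Nat) (ascen descen : Int) : Int × Int :=
  if h : i + 1 < cs.length then
    if cs[i] < cs[i+1] then checkAux cs (i+1) (ascen+1) descen
    else if cs[i+1] < cs[i] then checkAux cs (i+1) ascen (descen+1)
    else (ascen, descen)   -- break
  else (ascen, descen)
termination_by cs.length - i

def check (s : String) : String :=
  let cs := s.toList
  let r := checkAux cs 0 0 0
  if r.1 = (cs.length : Int) - 1 then "is Ascending"
  else if r.2 = (cs.length : Int) - 1 then "is descending"
  else "Not in order"

-- ===== PORT B =====
def check_alt (s : String) : String :=
  let pairs := s.toList.zip s.toList.tail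
  if pairs.all (fun p => p.1 < p.2) then "is Ascending"
  else if pairs.all (fun p => p.2 < p.1) then "is descending"
  else "Not in order"

-- ===== PRECONDITION & SPEC =====
-- On the empty string A returns "Not in order" only because its counter 0 cannot equal the
-- accidental len(s)-1 = -1, while B returns "is Ascending" (vacuously ordered), consistent
-- with the single-character case both programs treat as ascending.
def D_check (s : String) : Prop := s = ""
instance (s : String) : Decidable (D_check s) := by unfold D_check; infer_instance
def Spec_check (s : String) (out : String) : Prop := ¬ D_check s → out = check_alt s
instance (s : String) (out : String) : Decidable (Spec_check s out) := by unfold Spec_check; infer_instance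
def pvDiffWitness_check : String := ""
def pvDiffWitnessOut_check : String × String := ("Not in order", "is Ascending")

-- ===== CLAIM (what is proved, stated in full; the proofs are below) =====
def Claim_unchanged_check : Prop := ∀ (s : String), Dom_check s → Spec_check s (check s)
def Claim_changed_check : Prop := Dom_check (pvDiffWitness_check) ∧ D_check (pvDiffWitness_check) ∧ check (pvDiffWitness_check) = pvDiffWitnessOut_check.1 ∧ check_alt (pvDiffWitness_check) = pvDiffWitnessOut_check.2 ∧ pvDiffWitnessOut_check.1 ≠ pvDiffWitnessOut_check.2
def Claim_exact_check : Prop := ∀ (s : String), Dom_check s → D_check s → check s ≠ check_alt s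

-- ===== LEMMAS AND PROOFS =====

-- proof-side recursive model of a single break-at-equality pass over the adjacent-pair list
def pairScan : List (Char × Char) → Nat × Nat
  | [] => (0, 0)
  | (x, y) :: rest =>
    if x < y then ((pairScan rest).1 + 1, (pairScan rest).2)
    else if y < x then ((pairScan rest).1, (pairScan rest).2 + 1)
    else (0, 0)

theorem pairScan_le (P : List (Char × Char)) :
    (pairScan P).1 ≤ P.length ∧ (pairScan P).2 ≤ P.length := by
  induction P with
  | nil => simp [pairScan]
  | cons p rest ih =>
    obtain ⟨x, y⟩ := p
    simp only [pairScan, List.length_cons]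
    split_ifs <;> simp <;> omega

theorem pairScan_fst_eq_iff (P : List (Char × Char)) :
    ((pairScan P).1 = P.length ↔ P.all (fun p => p.1 < p.2) = true) := by
  induction P with
  | nil => simp [pairScan]
  | cons p rest ih =>
    obtain ⟨x, y⟩ := p
    have hle := pairScan_le rest
    simp only [pairScan, List.length_cons, List.all_cons, Bool.and_eq_true, decide_eq_true_eq]
    split_ifs with h1 h2
    · simp [h1, Nat.add_right_cancel_iff, ih, decide_eq_true_eq]
    · constructor
      · intro he; norm_num at he; exact absurd he (by omega)
      · rintro ⟨hxy, -⟩; exact absurd hxy h1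
    · constructor
      · intro he; norm_num at he
      · rintro ⟨hxy, -⟩; exact absurd hxy h1

theorem pairScan_snd_eq_iff (P : List (Char × Char)) :
    ((pairScan P).2 = P.length ↔ P.all (fun p => p.2 < p.1) = true) := by
  induction P with
  | nil => simp [pairScan]
  | cons p rest ih =>
    obtain ⟨x, y⟩ := p
    have hle := pairScan_le rest
    simp only [pairScan, List.length_cons, List.all_cons, Bool.and_eq_true, decide_eq_true_eq]
    split_ifs with h1 h2
    · constructor
      · intro he; norm_num at he; exact absurd he (by omega)
      · rintro ⟨hyx, -⟩; exact absurd hyx (lt_asymm h1)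
    · simp [h2, Nat.add_right_cancel_iff, ih, decide_eq_true_eq]
    · constructor
      · intro he; norm_num at he
      · rintro ⟨hyx, -⟩; exact absurd hyx h2

theorem checkAux_eq_pairScan (cs : List Char) (i : Nat) (a d : Int) (hi : i < cs.length) :
    checkAux cs i a d =
      (a + ((pairScan ((cs.drop i).zip (cs.drop (i+1)))).1 : Int),
       d + ((pairScan ((cs.drop i).zip (cs.drop (i+1)))).2 : Int)) := by
  rw [checkAux]
  by_cases h : i + 1 < cs.length
  · have hdrop : cs.drop i = cs[i] :: cs.drop (i+1) := List.drop_eq_getElem_cons hi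
    have hdrop2 : cs.drop (i+1) = cs[i+1] :: cs.drop (i+1+1) := List.drop_eq_getElem_cons h
    have hzip : (cs.drop i).zip (cs.drop (i+1))
        = (cs[i], cs[i+1]) :: (cs.drop (i+1)).zip (cs.drop (i+1+1)) := by
      rw [hdrop, hdrop2]; rfl
    simp only [dif_pos h, hzip, pairScan]
    split_ifs with h1 h2
    · rw [checkAux_eq_pairScan cs (i+1) (a+1) d h]
      simp only [Prod.mk.injEq]
      constructor <;> push_cast <;> omega
    · rw [checkAux_eq_pairScan cs (i+1) a (d+1) h]
      simp only [Prod.mk.injEq]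
      constructor <;> push_cast <;> omega
    · simp
  · have hnil : cs.drop (i+1) = [] := List.drop_eq_nil_of_le (by omega)
    simp [dif_neg h, hnil, pairScan]
termination_by cs.length - i

theorem checkAux_nil : checkAux [] 0 0 0 = (0, 0) := by
  rw [checkAux]; simp

theorem check_empty : check "" = "Not in order" := by
  have h : ("" : String).toList = [] := by decide
  simp [check, h, checkAux_nil]

-- ===== VERDICT (by name: the statement is the Claim_ definition above) =====
theorem check_spec : Claim_unchanged_check := by
  intro s _ hD
  unfold check check_alt
  have hne : s.toList ≠ [] := by
    intro h
    apply hD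
    unfold D_check
    have := congrArg String.ofList h
    rwa [String.ofList_toList] at this
  set cs := s.toList with hcs
  have hlen : 0 < cs.length := List.length_pos_iff.mpr hne
  have htail : cs.drop 1 = cs.tail := by simp [List.drop_one]
  have h0 : cs.drop 0 = cs := by simp
  have hmain := checkAux_eq_pairScan cs 0 0 0 (by omega)
  rw [h0, htail] at hmain
  set P := cs.zip cs.tail with hP
  have hPlen : P.length = cs.length - 1 := by
    rw [hP, List.length_zip, List.length_tail]; omega
  have hfst := pairScan_fst_eq_iff P
  have hsnd := pairScan_snd_eq_iff P
  have e1 : ((0 : Int) + ((pairScan P).1 : Int) = (cs.length : Int) - 1)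
      ↔ P.all (fun p => p.1 < p.2) = true := by
    rw [← hfst]; constructor <;> intro h <;> omega
  have e2 : ((0 : Int) + ((pairScan P).2 : Int) = (cs.length : Int) - 1)
      ↔ P.all (fun p => p.2 < p.1) = true := by
    rw [← hsnd]; constructor <;> intro h <;> omega
  simp only [hmain, e1, e2]

theorem check_changed : Claim_changed_check := by
  unfold Claim_changed_check
  refine ⟨by decide, rfl, check_empty, by decide, by decide⟩

theorem check_tight : Claim_exact_check := by
  intro s _ hD
  unfold D_check at hD
  subst hD
  rw [check_empty]
  decide
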